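-- pv_equiv track=rewrite | github.com/ianfab/chess-variant-puzzler | filter.py | net_material
-- ===== SOURCE A (Python) =====
-- def net_material(piece_values, fen):
--     default_value = 0 if piece_values else 1
--     player_to_move = fen.split()[1]
--     board = fen.split()[0]
--     white_total = 0
--     black_total = 0
--     for c in board:
--         if c.isupper():
--             white_total += piece_values.get(c.lower(), default_value)
--         elif c.islower():
--             black_total += piece_values.get(c.lower(), default_value)
--     if player_to_move == 'w':
--         return white_total - black_total
--     else:
--         return black_total - white_total
-- ===== SOURCE B (Python) =====
-- def net_material(piece_values, fen):
--     parts = fen.split()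
--     board, turn = parts[0], parts[1]
--     default_value = 0 if piece_values else 1
--     counts = {}
--     for c in board:
--         counts[c] = counts.get(c, 0) + 1
--     diff = 0
--     for ch, n in counts.items():
--         if ch.isupper():
--             diff += piece_values.get(ch.lower(), default_value) * n
--         elif ch.islower():
--             diff -= piece_values.get(ch.lower(), default_value) * n
--     return diff if turn == 'w' else -diff
-- ===== Notes on version B (the rewrite author's own statement) =====
-- stated objective: alternative
-- what changed: B tallies the board characters into a frequency dict in one pass and then computes a single signed difference by multiplying each distinct piece's value by its count, instead of A's per-character accumulation into separate white/black totals; B does one dict lookup per distinct piece rather than one per board square.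
import Mathlib
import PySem

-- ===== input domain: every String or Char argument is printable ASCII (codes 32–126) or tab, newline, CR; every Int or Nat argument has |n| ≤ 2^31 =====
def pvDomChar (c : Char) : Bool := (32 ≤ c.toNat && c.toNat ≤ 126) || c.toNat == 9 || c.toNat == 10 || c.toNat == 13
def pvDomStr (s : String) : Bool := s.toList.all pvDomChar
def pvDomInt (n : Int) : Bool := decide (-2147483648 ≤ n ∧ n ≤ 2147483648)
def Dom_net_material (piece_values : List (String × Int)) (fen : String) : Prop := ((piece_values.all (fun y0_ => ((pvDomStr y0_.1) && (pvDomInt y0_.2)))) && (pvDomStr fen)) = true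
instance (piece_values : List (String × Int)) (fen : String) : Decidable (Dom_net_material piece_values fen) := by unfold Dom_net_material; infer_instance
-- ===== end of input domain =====

-- B replaces A's per-square accumulation into white/black totals by a tally of the board
-- characters followed by one value*count pass over the distinct pieces (alternative decomposition).


-- ===== PORT A =====
def net_material (piece_values : List (String × Int)) (fen : String) : Int :=
  let default_value : Int := if piece_values.isEmpty then 1 else 0
  -- fen.split()[1]: the IndexError case (fewer than two words) is excluded by Pre_net_material
  let player_to_move : String := (PySem.List.pyGet? (PySem.Str.split₀ fen) 1).getD ""
  let board : String := (PySem.List.pyGet? (PySem.Str.split₀ fen) 0).getD ""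
  let d : PySem.Dict String Int := PySem.Dict.mk piece_values
  let wb : Int × Int := board.toList.foldl
    (fun (acc : Int × Int) c =>
      if PySem.Chars.isupper c then
        (acc.1 + d.getD (String.mk [PySem.Chars.lowerChar c]) default_value, acc.2)
      else if PySem.Chars.islower c then
        (acc.1, acc.2 + d.getD (String.mk [PySem.Chars.lowerChar c]) default_value)
      else acc) (0, 0)
  if player_to_move == "w" then wb.1 - wb.2 else wb.2 - wb.1

-- ===== PORT B =====
def net_material_alt (piece_values : List (String × Int)) (fen : String) : Int :=
  let parts := PySem.Str.split₀ fen
  let board : String := (PySem.List.pyGet? parts 0).getD ""   -- IndexError excluded by Pre_net_material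
  let turn : String := (PySem.List.pyGet? parts 1).getD ""
  let default_value : Int := if piece_values.isEmpty then 1 else 0
  let counts : PySem.Dict Char Int := board.toList.foldl
    (fun (d : PySem.Dict Char Int) c => d.insert c (d.getD c 0 + 1)) PySem.Dict.empty
  let pv : PySem.Dict String Int := PySem.Dict.mk piece_values
  let diff : Int := counts.items.foldl
    (fun (acc : Int) (p : Char × Int) =>
      if PySem.Chars.isupper p.1 then
        acc + pv.getD (String.mk [PySem.Chars.lowerChar p.1]) default_value * p.2
      else if PySem.Chars.islower p.1 then
        acc - pv.getD (String.mk [PySem.Chars.lowerChar p.1]) default_value * p.2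
      else acc) 0
  if turn == "w" then diff else -diff

-- ===== PRECONDITION & SPEC =====
-- Pre_ excludes exactly the inputs where fen.split() has fewer than two words: there A raises IndexError.
def Pre_net_material (piece_values : List (String × Int)) (fen : String) : Prop :=
  2 ≤ (PySem.Str.split₀ fen).length
instance (piece_values : List (String × Int)) (fen : String) : Decidable (Pre_net_material piece_values fen) := by unfold Pre_net_material; infer_instance
def pvWitness_net_material : (List (String × Int)) × String := ([("p", 1), ("q", 9)], "rnbq/PPPP w")
def Spec_net_material (piece_values : List (String × Int)) (fen : String) (out : Int) : Prop := out = net_material_alt piece_values fen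
instance (piece_values : List (String × Int)) (fen : String) (out : Int) : Decidable (Spec_net_material piece_values fen out) := by unfold Spec_net_material; infer_instance

-- ===== CLAIM (what is proved, stated in full; the proofs are below) =====
def Claim_equal_net_material : Prop := ∀ (piece_values : List (String × Int)) (fen : String), Dom_net_material piece_values fen → Pre_net_material piece_values fen → Spec_net_material piece_values fen (net_material piece_values fen)

-- ===== LEMMAS AND PROOFS =====

theorem pv_upper_not_lower (c : Char) (h : PySem.Chars.isupper c = true) :
    PySem.Chars.islower c = false := by
  simp [PySem.Chars.isupper, PySem.Chars.islower] at *
  intro h2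
  exact absurd (le_trans h2 h.2) (by decide)

-- A's pair loop computes the two branch-filtered sums.
theorem pv_foldA (d : PySem.Dict String Int) (dv : Int) (l : List Char) (x y : Int) :
    l.foldl (fun (acc : Int × Int) c =>
      if PySem.Chars.isupper c then
        (acc.1 + d.getD (String.mk [PySem.Chars.lowerChar c]) dv, acc.2)
      else if PySem.Chars.islower c then
        (acc.1, acc.2 + d.getD (String.mk [PySem.Chars.lowerChar c]) dv)
      else acc) (x, y)
    = (x + (l.map (fun c => if PySem.Chars.isupper c then d.getD (String.mk [PySem.Chars.lowerChar c]) dv else 0)).sum,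
       y + (l.map (fun c => if PySem.Chars.islower c then d.getD (String.mk [PySem.Chars.lowerChar c]) dv else 0)).sum) := by
  induction l generalizing x y with
  | nil => simp
  | cons a t ih =>
    by_cases hu : PySem.Chars.isupper a = true
    · have hlo' : ¬ PySem.Chars.islower a = true := by simp [pv_upper_not_lower a hu]
      simp only [List.foldl_cons, List.map_cons, List.sum_cons, if_pos hu, if_neg hlo']
      rw [ih]
      simp only [Prod.mk.injEq]
      exact ⟨by ring, by ring⟩
    · by_cases hlo : PySem.Chars.islower a = true
      · simp only [List.foldl_cons, List.map_cons, List.sum_cons, if_neg hu, if_pos hlo]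
        rw [ih]
        simp only [Prod.mk.injEq]
        exact ⟨by ring, by ring⟩
      · simp only [List.foldl_cons, List.map_cons, List.sum_cons, if_neg hu, if_neg hlo]
        rw [ih]
        simp only [Prod.mk.injEq]
        exact ⟨by ring, by ring⟩

-- signed per-character contributions vs the two separate totals
theorem pv_sum_sub (v : Char → Int) (l : List Char) :
    (l.map (fun c => if PySem.Chars.isupper c then v c else if PySem.Chars.islower c then -v c else 0)).sum
    = (l.map (fun c => if PySem.Chars.isupper c then v c else 0)).sum
      - (l.map (fun c => if PySem.Chars.islower c then v c else 0)).sum := by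
  induction l with
  | nil => simp
  | cons a t ih =>
    by_cases hu : PySem.Chars.isupper a = true
    · have hlo' : ¬ PySem.Chars.islower a = true := by simp [pv_upper_not_lower a hu]
      simp only [List.map_cons, List.sum_cons, if_pos hu, if_neg hlo']
      rw [ih]; ring
    · by_cases hlo : PySem.Chars.islower a = true
      · simp only [List.map_cons, List.sum_cons, if_neg hu, if_pos hlo]
        rw [ih]; ring
      · simp only [List.map_cons, List.sum_cons, if_neg hu, if_neg hlo]
        rw [ih]; ring

theorem pv_sum_single (f : Char → Int) (s : List Char) (hs : s.Nodup) (a : Char) (ha : a ∈ s) :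
    (s.map (fun k => if k = a then f k else 0)).sum = f a := by
  induction s with
  | nil => simp at ha
  | cons b t ih =>
    obtain ⟨hb, ht⟩ := List.nodup_cons.mp hs
    simp only [List.map_cons, List.sum_cons]
    by_cases hba : b = a
    · subst hba
      have h0 : (t.map (fun k => if k = b then f k else 0)).sum = 0 := by
        apply List.sum_eq_zero
        intro x hx
        obtain ⟨k, hk, rfl⟩ := List.mem_map.mp hx
        have hkb : k ≠ b := by intro he; exact hb (by rw [← he]; exact hk)
        simp [hkb]
      simp [h0]
    · have h : a ∈ t := by
        rcases List.mem_cons.mp ha with h | h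
        · exact absurd h.symm hba
        · exact h
      rw [ih ht h]
      simp [hba]

-- summing f over occurrences equals summing f k * count k over a nodup cover of the elements
theorem pv_sum_count (f : Char → Int) (s l : List Char) (hs : s.Nodup) (hl : ∀ x ∈ l, x ∈ s) :
    (s.map (fun k => f k * (l.count k : Int))).sum = (l.map f).sum := by
  induction l with
  | nil => simp
  | cons a t ih =>
    have ht : ∀ x ∈ t, x ∈ s := fun x hx => hl x (List.mem_cons_of_mem _ hx)
    have ha : a ∈ s := hl a List.mem_cons_self
    have step : (s.map (fun k => f k * ((a :: t).count k : Int))).sum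
        = (s.map (fun k => f k * (t.count k : Int) + (if k = a then f k else 0))).sum := by
      apply congrArg
      apply List.map_congr_left
      intro k _
      by_cases h : k = a
      · subst h
        simp only [List.count_cons, BEq.rfl, if_true]
        push_cast
        ring
      · have : (a == k) = false := by simp [Ne.symm h]
        simp [List.count_cons, this, h]
    rw [step, List.sum_map_add, pv_sum_single f s hs a ha, ih ht]
    simp only [List.map_cons, List.sum_cons]
    ring

-- the core identity: B's distinct-piece pass equals A's white total minus black total
theorem pv_core (d : PySem.Dict String Int) (dv : Int) (l : List Char) :
    (((PySem.Set.ofList l).map (fun k => (k, (l.count k : Int)))).foldl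
      (fun (acc : Int) (p : Char × Int) =>
        if PySem.Chars.isupper p.1 then
          acc + d.getD (String.mk [PySem.Chars.lowerChar p.1]) dv * p.2
        else if PySem.Chars.islower p.1 then
          acc - d.getD (String.mk [PySem.Chars.lowerChar p.1]) dv * p.2
        else acc) 0)
    = (l.map (fun c => if PySem.Chars.isupper c then d.getD (String.mk [PySem.Chars.lowerChar c]) dv else 0)).sum
      - (l.map (fun c => if PySem.Chars.islower c then d.getD (String.mk [PySem.Chars.lowerChar c]) dv else 0)).sum := by
  have hfold : ∀ (ps : List (Char × Int)) (a : Int),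
      ps.foldl (fun (acc : Int) (p : Char × Int) =>
        if PySem.Chars.isupper p.1 then
          acc + d.getD (String.mk [PySem.Chars.lowerChar p.1]) dv * p.2
        else if PySem.Chars.islower p.1 then
          acc - d.getD (String.mk [PySem.Chars.lowerChar p.1]) dv * p.2
        else acc) a
      = a + (ps.map (fun p => if PySem.Chars.isupper p.1 then d.getD (String.mk [PySem.Chars.lowerChar p.1]) dv * p.2
          else if PySem.Chars.islower p.1 then -(d.getD (String.mk [PySem.Chars.lowerChar p.1]) dv * p.2) else 0)).sum := by
    intro ps
    induction ps with
    | nil => simp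
    | cons q qs ih =>
      intro a
      simp only [List.foldl_cons, List.map_cons, List.sum_cons]
      split_ifs <;> rw [ih] <;> ring
  rw [hfold, List.map_map]
  have hcongr : ((PySem.Set.ofList l).map
      ((fun p : Char × Int => if PySem.Chars.isupper p.1 then d.getD (String.mk [PySem.Chars.lowerChar p.1]) dv * p.2
          else if PySem.Chars.islower p.1 then -(d.getD (String.mk [PySem.Chars.lowerChar p.1]) dv * p.2) else 0)
        ∘ (fun k => (k, (l.count k : Int)))))
      = (PySem.Set.ofList l).map (fun k =>
          (fun c => if PySem.Chars.isupper c then d.getD (String.mk [PySem.Chars.lowerChar c]) dv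
            else if PySem.Chars.islower c then -(d.getD (String.mk [PySem.Chars.lowerChar c]) dv) else 0) k
            * (l.count k : Int)) := by
    apply List.map_congr_left
    intro k _
    simp only [Function.comp]
    split_ifs <;> ring
  rw [hcongr,
    pv_sum_count _ (PySem.Set.ofList l) l (PySem.Set.nodup_ofList l)
      (fun x hx => (PySem.Set.mem_ofList l x).mpr hx),
    pv_sum_sub, zero_add]

-- ===== VERDICT (by name: the statement is the Claim_ definition above) =====
theorem net_material_spec : Claim_equal_net_material := by
  intro piece_values fen _ _
  unfold Spec_net_material
  simp only [net_material, net_material_alt,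
    PySem.Dict.foldl_insert_getD_add_one_eq_counter, PySem.Dict.items_counter,
    pv_foldA, pv_core]
  split_ifs <;> ring
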